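-- pv_equiv track=rewrite | github.com/caoye04/codetrain | 26.py | get_arithmetic_info
-- ===== SOURCE A (Python) =====
-- def get_arithmetic_info(arr):
--     """从数组中获取等差数列信息，返回(首项, 公差)或None"""
--     non_zero = [(i, val) for i, val in enumerate(arr) if val != 0]
--
--     if len(non_zero) < 2:
--         return None
--
--     # 用前两个非零元素计算公差
--     pos1, val1 = non_zero[0]
--     pos2, val2 = non_zero[1]
--
--     if pos2 == pos1:
--         return None
--
--     d = (val2 - val1) // (pos2 - pos1)
--     a1 = val1 - d * pos1
--
--     # 验证所有非零元素是否符合等差数列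
--     for pos, val in non_zero:
--         if a1 + d * pos != val:
--             return None
--
--     if a1 <= 0:  # 确保首项为正
--         return None
--
--     return (a1, d)
-- ===== SOURCE B (Python) =====
-- def get_arithmetic_info(arr):
--     """从数组中获取等差数列信息，返回(首项, 公差)或None"""
--     prev = None   # last non-zero (pos, val) seen so far
--     d = None      # common difference once the first gap fixes it
--     for i, v in enumerate(arr):
--         if v == 0:
--             continue
--         if prev is not None:
--             dp = i - prev[0]
--             dv = v - prev[1]
--             if d is None:
--                 if dv % dp != 0:
--                     return None
--                 d = dv // dp
--             elif dv != d * dp: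
--                 return None
--         prev = (i, v)
--     if d is None:
--         return None
--     a1 = prev[1] - d * prev[0]
--     return (a1, d) if a1 > 0 else None
-- ===== Notes on version B (the rewrite author's own statement) =====
-- stated objective: faster
-- what changed: Instead of building the non-zero (index,value) list, fitting a line through its first two points and re-validating every point against it in a second loop, B streams once over enumerate(arr) checking local consistency of consecutive non-zero gaps (exact divisibility of the first gap, dv == d*dp for each later gap), keeping only the previous point and d, and derives the first term at the end from the LAST non-zero point.
import Mathlib
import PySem

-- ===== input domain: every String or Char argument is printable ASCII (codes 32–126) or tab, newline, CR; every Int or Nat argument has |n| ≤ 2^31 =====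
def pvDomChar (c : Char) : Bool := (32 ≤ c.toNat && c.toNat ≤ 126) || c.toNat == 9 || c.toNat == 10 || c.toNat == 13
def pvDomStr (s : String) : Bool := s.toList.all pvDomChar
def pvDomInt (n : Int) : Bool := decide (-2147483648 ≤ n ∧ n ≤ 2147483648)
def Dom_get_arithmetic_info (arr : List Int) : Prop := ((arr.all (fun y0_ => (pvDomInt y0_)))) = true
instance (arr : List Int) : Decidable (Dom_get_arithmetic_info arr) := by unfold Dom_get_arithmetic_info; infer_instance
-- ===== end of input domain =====

-- B replaces A's fit-line-from-first-two-then-revalidate-all scheme by a local consistency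
-- check of consecutive non-zero gaps, deriving the first term from the LAST non-zero point.

-- ===== PORT A =====
def get_arithmetic_info (arr : List Int) : Option (Int × Int) :=
  let non_zero := (PySem.List.enumerate arr).filter (fun p => p.2 ≠ 0)
  match non_zero with
  | (pos1, val1) :: (pos2, val2) :: _ =>
    if pos2 = pos1 then none
    else
      let d := PySem.Int.floordiv (val2 - val1) (pos2 - pos1)
      let a1 := val1 - d * pos1
      -- the for-loop over non_zero with early `return None` on a mismatch:
      if non_zero.all (fun p => a1 + d * p.1 = p.2) then
        if a1 ≤ 0 then none else some (a1, d)
      else none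
  | _ => none

-- ===== PORT B =====
-- state: `prev` = last non-zero (pos,val); `d` = the common difference once the first gap fixes it.
-- result `none` = early `return None`; `some (prev, d)` = the loop finished with that state.
def bLoop : List (Int × Int) → Option (Int × Int) → Option Int →
    Option (Option (Int × Int) × Option Int)
  | [], prev, d => some (prev, d)
  | (i, v) :: rest, prev, d =>
    if v = 0 then bLoop rest prev d
    else
      match prev, d with
      | none, d => bLoop rest (some (i, v)) d
      | some (p0, v0), none =>
        if PySem.Int.mod (v - v0) (i - p0) ≠ 0 then none
        else bLoop rest (some (i, v)) (some (PySem.Int.floordiv (v - v0) (i - p0)))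
      | some (p0, v0), some d0 =>
        if v - v0 ≠ d0 * (i - p0) then none
        else bLoop rest (some (i, v)) (some d0)

def get_arithmetic_info_alt (arr : List Int) : Option (Int × Int) :=
  match bLoop (PySem.List.enumerate arr) none none with
  | some (some (pl, vl), some d) =>
    let a1 := vl - d * pl
    if a1 > 0 then some (a1, d) else none
  | _ => none

-- ===== PRECONDITION & SPEC =====
def Spec_get_arithmetic_info (arr : List Int) (out : Option (Int × Int)) : Prop := out = get_arithmetic_info_alt arr
instance (arr : List Int) (out : Option (Int × Int)) : Decidable (Spec_get_arithmetic_info arr out) := by unfold Spec_get_arithmetic_info; infer_instance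

-- ===== CLAIM (what is proved, stated in full; the proofs are below) =====
def Claim_equal_get_arithmetic_info : Prop := ∀ (arr : List Int), Dom_get_arithmetic_info arr → Spec_get_arithmetic_info arr (get_arithmetic_info arr)

-- ===== LEMMAS AND PROOFS =====

-- bLoop skips zeros: it only depends on the non-zero elements
theorem bLoop_filter (l : List (Int × Int)) (prev : Option (Int × Int)) (d : Option Int) :
    bLoop l prev d = bLoop (l.filter (fun p => p.2 ≠ 0)) prev d := by
  induction l generalizing prev d with
  | nil => rfl
  | cons x xs ih =>
    obtain ⟨i, v⟩ := x
    by_cases h : v = 0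
    · simp [bLoop, h, ih]
    · simp only [List.filter_cons, decide_not, h, decide_false, Bool.not_false, if_true]
      cases prev with
      | none => simp [bLoop, h, ih]
      | some f =>
        obtain ⟨p0, v0⟩ := f
        cases d with
        | none => simp only [bLoop, h, if_false]; split_ifs <;> simp [ih]
        | some d0 => simp only [bLoop, h, if_false]; split_ifs <;> simp [ih]

-- once d is fixed, bLoop on a zero-free list checks each point against the line and
-- ends with the last point as `prev`
theorem bLoop_run (l : List (Int × Int)) (p0 v0 d0 : Int)
    (hz : ∀ p ∈ l, p.2 ≠ (0 : Int)) :
    bLoop l (some (p0, v0)) (some d0) =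
      if l.all (fun q => q.2 = v0 + d0 * (q.1 - p0)) then
        some (some (l.foldl (fun _ q => q) (p0, v0)), some d0)
      else none := by
  induction l generalizing p0 v0 with
  | nil => rfl
  | cons x xs ih =>
    obtain ⟨i, v⟩ := x
    have hv : v ≠ 0 := hz (i, v) (by simp)
    have hxs : ∀ p ∈ xs, p.2 ≠ (0 : Int) := fun p hp => hz p (List.mem_cons_of_mem _ hp)
    by_cases hc : v - v0 = d0 * (i - p0)
    · have hline : v = v0 + d0 * (i - p0) := by omega
      have hall : xs.all (fun q => q.2 = v + d0 * (q.1 - i)) =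
          xs.all (fun q => q.2 = v0 + d0 * (q.1 - p0)) := by
        rw [Bool.eq_iff_iff]
        simp only [List.all_eq_true, decide_eq_true_eq]
        constructor <;> intro h q hq <;>
          [ (have hx := h q hq;
             have he : v + d0 * (q.1 - i) = v0 + d0 * (q.1 - p0) := by rw [hline]; ring;
             rw [← he]; exact hx);
            (have hx := h q hq;
             have he : v + d0 * (q.1 - i) = v0 + d0 * (q.1 - p0) := by rw [hline]; ring;
             rw [he]; exact hx) ]
      rw [show bLoop ((i, v) :: xs) (some (p0, v0)) (some d0)
            = bLoop xs (some (i, v)) (some d0) from by simp [bLoop, hv, hc]]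
      rw [ih i v hxs, hall]
      have hdt : decide (v = v0 + d0 * (i - p0)) = true := decide_eq_true hline
      simp only [List.all_cons, hdt, Bool.true_and, List.foldl_cons]
    · have hline : ¬ (v = v0 + d0 * (i - p0)) := by omega
      rw [show bLoop ((i, v) :: xs) (some (p0, v0)) (some d0) = none from by
            simp [bLoop, hv, hc]]
      simp [List.all_cons, hline]

-- the final `prev` lies on the line as well
theorem lastPt_on (l : List (Int × Int)) (p0 v0 d0 : Int)
    (h : ∀ q ∈ l, q.2 = v0 + d0 * (q.1 - p0)) :
    (l.foldl (fun _ q => q) (p0, v0)).2 =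
      v0 + d0 * ((l.foldl (fun _ q => q) (p0, v0)).1 - p0) := by
  induction l generalizing p0 v0 with
  | nil => simp
  | cons x xs ih =>
    obtain ⟨i, v⟩ := x
    have hx : v = v0 + d0 * (i - p0) := h (i, v) (by simp)
    have hxs : ∀ q ∈ xs, q.2 = v + d0 * (q.1 - i) := by
      intro q hq
      have hq' := h q (List.mem_cons_of_mem _ hq)
      have : v + d0 * (q.1 - i) = v0 + d0 * (q.1 - p0) := by rw [hx]; ring
      rw [this]; exact hq'
    have := ih i v hxs
    simp only [List.foldl_cons] at *
    rw [this, hx]; ring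

theorem filter_no_zero (arr : List Int) :
    ∀ p ∈ (PySem.List.enumerate arr).filter (fun p => p.2 ≠ (0 : Int)), p.2 ≠ (0 : Int) := by
  intro p hp
  have := List.of_mem_filter hp
  simpa using this

-- positions in the filtered enumerate stay strictly increasing
theorem filter_pairwise (arr : List Int) :
    ((PySem.List.enumerate arr).filter (fun p => p.2 ≠ (0 : Int))).Pairwise
      (fun p q : Int × Int => p.1 < q.1) :=
  List.Pairwise.filter _ (PySem.List.pairwise_lt_enumerate arr 0)

theorem get_arithmetic_info_eq (arr : List Int) :
    get_arithmetic_info arr = get_arithmetic_info_alt arr := by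
  unfold get_arithmetic_info get_arithmetic_info_alt
  rw [bLoop_filter]
  generalize hnz : (PySem.List.enumerate arr).filter (fun p => p.2 ≠ (0:Int)) = nz
  have hz : ∀ p ∈ nz, p.2 ≠ (0 : Int) := hnz ▸ filter_no_zero arr
  have hpw : nz.Pairwise (fun p q : Int × Int => p.1 < q.1) := hnz ▸ filter_pairwise arr
  match nz with
  | [] => rfl
  | [x] => obtain ⟨p1, v1⟩ := x; simp [bLoop, hz (p1, v1) (by simp)]
  | (p1, v1) :: (p2, v2) :: rest =>
    have hv1 : v1 ≠ 0 := hz (p1, v1) (by simp)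
    have hv2 : v2 ≠ 0 := hz (p2, v2) (by simp)
    have hlt : p1 < p2 := (List.pairwise_cons.mp hpw).1 (p2, v2) (by simp)
    have hne : p2 ≠ p1 := by omega
    have hzr : ∀ p ∈ rest, p.2 ≠ (0 : Int) := fun p hp =>
      hz p (List.mem_cons_of_mem _ (List.mem_cons_of_mem _ hp))
    have hstep : bLoop ((p1, v1) :: (p2, v2) :: rest) none none =
        if PySem.Int.mod (v2 - v1) (p2 - p1) ≠ 0 then none
        else bLoop rest (some (p2, v2)) (some (PySem.Int.floordiv (v2 - v1) (p2 - p1))) := by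
      simp [bLoop, hv1, hv2]
    rw [hstep]
    simp only [ne_eq]
    rw [if_neg hne]
    have hdm := PySem.Int.floordiv_mul_add_mod (v2 - v1) (p2 - p1)
    by_cases hm0 : PySem.Int.mod (v2 - v1) (p2 - p1) = 0
    · -- the first gap divides exactly: both sides check the same line
      rw [if_neg (not_not_intro hm0)]
      rw [hm0] at hdm
      generalize hd : PySem.Int.floordiv (v2 - v1) (p2 - p1) = d at hdm ⊢
      have hm' : d * (p2 - p1) = v2 - v1 := by linarith
      rw [bLoop_run rest p2 v2 d hzr]
      by_cases hrest : (rest.all (fun q => decide (q.2 = v2 + d * (q.1 - p2)))) = true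
      · have hon : ∀ q ∈ rest, q.2 = v2 + d * (q.1 - p2) := fun q hq =>
          of_decide_eq_true (List.all_eq_true.mp hrest q hq)
        rw [if_pos hrest]
        rcases hL : rest.foldl (fun _ q => q) (p2, v2) with ⟨pl, vl⟩
        have hl := lastPt_on rest p2 v2 d hon
        rw [hL] at hl
        simp only at hl
        -- A's validation succeeds on every element
        have hA1 : v1 - d * p1 + d * p1 = v1 := by ring
        have hA2 : v1 - d * p1 + d * p2 = v2 := by ring_nf; ring_nf at hm'; linarith
        have hArest : ∀ q ∈ rest, v1 - d * p1 + d * q.1 = q.2 := by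
          intro q hq
          have hq' := hon q hq
          ring_nf at hq' ⊢; ring_nf at hm'; linarith
        have hfa : vl - d * pl = v1 - d * p1 := by
          ring_nf at hl ⊢; ring_nf at hm'; linarith
        simp only [List.all_cons, hA1, hA2, decide_true, Bool.true_and]
        rw [List.all_eq_true.mpr (fun q hq => decide_eq_true (hArest q hq))]
        simp only [hfa]
        split_ifs <;> first | rfl | omega
      · -- a later gap breaks the line: A's validation fails on that element too
        rw [if_neg hrest]
        have : ∃ q ∈ rest, ¬ (v1 - d * p1 + d * q.1 = q.2) := by
          by_contra hco
          push Not at hco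
          exact hrest (List.all_eq_true.mpr (fun q hq => decide_eq_true (by
            have := hco q hq
            ring_nf at this ⊢; ring_nf at hm'; linarith)))
        obtain ⟨q, hq, hqne⟩ := this
        rw [if_neg]
        intro hall
        exact hqne (of_decide_eq_true (List.all_eq_true.mp hall q
          (List.mem_cons_of_mem _ (List.mem_cons_of_mem _ hq))))
    · -- first gap not exact: B stops; A's validation fails at the second point
      rw [if_pos hm0]
      have hmlt : PySem.Int.mod (v2 - v1) (p2 - p1) ≠ 0 := hm0
      generalize hd : PySem.Int.floordiv (v2 - v1) (p2 - p1) = d at hdm ⊢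
      have hne2 : ¬ (v1 - d * p1 + d * p2 = v2) := by
        intro h
        have h2 : d * (p2 - p1) = v2 - v1 := by ring_nf at h; ring_nf; linarith
        omega
      rw [if_neg]
      intro hall
      exact hne2 (of_decide_eq_true (List.all_eq_true.mp hall (p2, v2) (by simp)))

-- ===== VERDICT (by name: the statement is the Claim_ definition above) =====
theorem get_arithmetic_info_spec : Claim_equal_get_arithmetic_info := by
  intro arr _
  unfold Spec_get_arithmetic_info
  exact get_arithmetic_info_eq arr
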